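-- pv_equiv track=rewrite | github.com/fededarold/evo_grail | distances_certainty.py | get_min_distances_map
-- ===== SOURCE A (Python) =====
-- def get_min_distances_map(t):
--     """Return the set of the minimum distances for all the points in T.
--      T is the set of trace points (episodes) used to define the certainty map."""
--     distances_map = [[None] * len(t) for i in range(len(t[0]))]
--     n_gr = 99999
--     for k in range(len(t)):
--         for i in range(len(t[0])):
--             d_pos = n_gr
--             d_neg = d_pos
--             for j in range(len(t)):
--                 if k != j:
--                     d = t[k][i] - t[j][i]
--                     if d > 0:
--                         d_pos = min(d_pos, d)
--                     else:
--                         d_neg = min(d_neg, -d)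
--             if d_pos > n_gr / 2:
--                 d_pos = -1
--             if d_neg > n_gr / 2:
--                 d_neg = -1
--             distances_map[i][k] = max(d_pos, d_neg)
--     return distances_map
-- ===== SOURCE B (Python) =====
-- def get_min_distances_map(t):
--     """Same map as A, computed per dimension from sorted distinct values:
--     each point's gap to its strict predecessor / successor value is read off
--     the sorted order instead of an inner scan over all other points."""
--     out = []
--     for i in range(len(t[0])):
--         vals = [row[i] for row in t]
--         cnt = {}
--         for v in vals:
--             cnt[v] = cnt.get(v, 0) + 1
--         svals = sorted(cnt)
--         prev_gap = {}
--         next_gap = {}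
--         for a, b in zip(svals, svals[1:]):
--             prev_gap[b] = b - a
--             next_gap[a] = b - a
--         row_out = []
--         for v in vals:
--             g = prev_gap.get(v)
--             dpos = g if g is not None and g <= 49999 else -1
--             if cnt[v] > 1:
--                 dneg = 0
--             else:
--                 g = next_gap.get(v)
--                 dneg = g if g is not None and g <= 49999 else -1
--             row_out.append(max(dpos, dneg))
--         out.append(row_out)
--     return out
-- ===== Notes on version B (the rewrite author's own statement) =====
-- stated objective: faster
-- what changed: Instead of scanning all other points for every (point, dimension) pair, B sorts each dimension's distinct values once and reads each point's nearest-below / nearest-at-or-above gap off the sorted order via precomputed gap dictionaries.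
import Mathlib
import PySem

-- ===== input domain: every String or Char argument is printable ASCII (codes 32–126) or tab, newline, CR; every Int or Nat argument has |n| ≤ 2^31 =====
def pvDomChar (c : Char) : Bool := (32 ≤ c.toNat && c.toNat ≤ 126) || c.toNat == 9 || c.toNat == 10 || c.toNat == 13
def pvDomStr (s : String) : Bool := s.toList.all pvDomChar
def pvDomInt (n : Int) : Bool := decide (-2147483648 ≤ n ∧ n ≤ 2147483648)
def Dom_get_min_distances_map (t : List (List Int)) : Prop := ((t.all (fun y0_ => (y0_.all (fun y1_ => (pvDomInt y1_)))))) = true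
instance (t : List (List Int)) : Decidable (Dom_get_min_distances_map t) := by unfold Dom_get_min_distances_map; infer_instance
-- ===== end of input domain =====

-- B replaces A's inner O(N) scan per (point, dimension) by one sorted pass per dimension:
-- each point's two candidate gaps are read off the sorted distinct column values (asymptotically faster).

-- ===== PORT A =====
def get_min_distances_map (t : List (List Int)) : List (List Int) :=
  let n : Int := (t.length : Int)
  let m : Int := ((t.headD []).length : Int)  -- len(t[0]); Python raises IndexError on t = [] (excluded by Pre_)
  -- [[None] * len(t) for i in range(len(t[0]))]; None is a placeholder (0 here): every cell is assigned below
  let dm0 : List (List Int) := (PySem.List.pyRange 0 m 1).map (fun _ => List.replicate n.toNat 0)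
  (PySem.List.pyRange 0 n 1).foldl (fun dm k =>
    (PySem.List.pyRange 0 m 1).foldl (fun dm i =>
      let pn := (PySem.List.pyRange 0 n 1).foldl (fun (pn : Int × Int) j =>
        if k ≠ j then
          -- t[k][i] - t[j][i]; indices are in range under Pre_ (pyGetD default never read there)
          let d := PySem.List.pyGetD (PySem.List.pyGetD t k []) i 0 - PySem.List.pyGetD (PySem.List.pyGetD t j []) i 0
          if d > 0 then (min pn.1 d, pn.2) else (pn.1, min pn.2 (-d))
        else pn) ((99999 : Int), (99999 : Int))
      let d_pos := if pn.1 > 49999 then (-1 : Int) else pn.1  -- 'd_pos > 99999 / 2' on integers is exactly 'd_pos > 49999'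
      let d_neg := if pn.2 > 49999 then (-1 : Int) else pn.2
      dm.set i.toNat ((dm.getD i.toNat []).set k.toNat (max d_pos d_neg))) dm) dm0

-- ===== PORT B =====
-- g if g is not None and g <= 49999 else -1
def pvClamp (g : Option Int) : Int :=
  match g with
  | some g => if g ≤ 49999 then g else -1
  | none => -1

def get_min_distances_map_alt (t : List (List Int)) : List (List Int) :=
  (PySem.List.pyRange 0 ((t.headD []).length : Int) 1).foldl (fun out i =>
    let vals := t.map (fun row => PySem.List.pyGetD row i 0)  -- row[i]; in range under Pre_
    let cnt := vals.foldl (fun (d : PySem.Dict Int Int) v => d.insert v (d.getD v 0 + 1)) PySem.Dict.empty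
    let svals := PySem.List.sorted cnt.keys (fun x => x) false  -- sorted(cnt): dict keys in insertion order
    let gaps := (svals.zip svals.tail).foldl  -- zip(svals, svals[1:])
      (fun (gp : PySem.Dict Int Int × PySem.Dict Int Int) ab =>
        (gp.1.insert ab.2 (ab.2 - ab.1), gp.2.insert ab.1 (ab.2 - ab.1))) (PySem.Dict.empty, PySem.Dict.empty)
    let rowOut := vals.foldl (fun ro v =>
      let dpos := pvClamp (gaps.1.get? v)
      let dneg := if cnt.getD v 0 > 1 then (0 : Int) else pvClamp (gaps.2.get? v)
      ro ++ [max dpos dneg]) []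
    out ++ [rowOut]) []

-- ===== PRECONDITION & SPEC =====
-- Pre_ excludes exactly the inputs where Python A raises an IndexError: the empty list (t[0])
-- and lists whose later rows are shorter than row 0 (t[j][i] for i < len(t[0])).
def Pre_get_min_distances_map (t : List (List Int)) : Prop :=
  t ≠ [] ∧ ∀ row ∈ t, (t.headD []).length ≤ row.length
instance (t : List (List Int)) : Decidable (Pre_get_min_distances_map t) := by
  unfold Pre_get_min_distances_map; infer_instance

def pvWitness_get_min_distances_map : List (List Int) := [[5, 1], [3, 7], [3, 100001]]

def Spec_get_min_distances_map (t : List (List Int)) (out : List (List Int)) : Prop := out = get_min_distances_map_alt t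
instance (t : List (List Int)) (out : List (List Int)) : Decidable (Spec_get_min_distances_map t out) := by unfold Spec_get_min_distances_map; infer_instance

-- ===== CLAIM (what is proved, stated in full; the proofs are below) =====
def Claim_equal_get_min_distances_map : Prop := ∀ (t : List (List Int)), Dom_get_min_distances_map t → Pre_get_min_distances_map t → Spec_get_min_distances_map t (get_min_distances_map t)

-- ===== LEMMAS AND PROOFS =====

-- A's post-processing of an accumulated minimum
def pvThr (x : Int) : Int := if x > 49999 then -1 else x

-- column i of t (the values A and B compare along dimension i)
def pvCol (t : List (List Int)) (i : Nat) : List Int := t.map (fun row => row.getD i 0)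

-- what A's inner j-loop (plus thresholds and max) computes for point k in a column
def pvAEntry (vals : List Int) (k : Nat) : Int :=
  let v := vals.getD k 0
  let E := vals.take k ++ vals.drop (k + 1)
  max (pvThr (((E.filter (fun w => decide (0 < v - w))).map (fun w => v - w)).foldl min 99999))
      (pvThr (((E.filter (fun w => decide (v - w ≤ 0))).map (fun w => -(v - w))).foldl min 99999))

-- B's per-dimension data: sorted distinct values and the two gap dictionaries
def pvSvals (vals : List Int) : List Int := PySem.List.sorted (PySem.Set.ofList vals) (fun x => x) false
def pvPrevD (S : List Int) : PySem.Dict Int Int :=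
  (S.zip S.tail).foldl (fun d ab => d.insert ab.2 (ab.2 - ab.1)) PySem.Dict.empty
def pvNextD (S : List Int) : PySem.Dict Int Int :=
  (S.zip S.tail).foldl (fun d ab => d.insert ab.1 (ab.2 - ab.1)) PySem.Dict.empty

-- what B computes for a value v in a column
def pvBEntry (vals : List Int) (v : Int) : Int :=
  max (pvClamp ((pvPrevD (pvSvals vals)).get? v))
      (if ((vals.count v : Int)) > 1 then 0 else pvClamp ((pvNextD (pvSvals vals)).get? v))

theorem pvThr_min (g : Int) : pvThr (min 99999 g) = pvClamp (some g) := by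
  unfold pvThr pvClamp
  rcases le_total (99999 : Int) g with h | h <;> simp [min_def] <;> split_ifs <;> omega

theorem pv_mfold_eq_min (L : List Int) (g : Int) (hg : g ∈ L) (hall : ∀ x ∈ L, g ≤ x) :
    L.foldl min (99999 : Int) = min 99999 g := by
  have h1 := PySem.List.foldl_min_le L (99999 : Int)
  have h2 := PySem.List.foldl_min_mem L (99999 : Int)
  apply le_antisymm
  · exact le_min h1.1 (h1.2 g hg)
  · rcases h2 with h | h
    · rw [h]; exact min_le_left _ _
    · exact le_trans (min_le_right _ _) (hall _ h)

theorem pv_zip_tail_snd {α : Type} (l : List α) : (l.zip l.tail).map Prod.snd = l.tail := by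
  induction l with
  | nil => simp
  | cons a l ih => cases l with
    | nil => simp
    | cons b t => simpa using ih

theorem pv_zip_tail_fst {α : Type} (l : List α) : (l.zip l.tail).map Prod.fst = l.dropLast := by
  induction l with
  | nil => simp
  | cons a l ih => cases l with
    | nil => simp
    | cons b t => simpa using ih

theorem pvSvals_pairwise (vals : List Int) : (pvSvals vals).Pairwise (· < ·) :=
  PySem.List.sorted_ofList_pairwise_lt vals

theorem pvSvals_mem (vals : List Int) (v : Int) : v ∈ pvSvals vals ↔ v ∈ vals := by
  simp [pvSvals, PySem.List.mem_sorted, PySem.Set.mem_ofList]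

theorem pvSvals_nodup (vals : List Int) : (pvSvals vals).Nodup :=
  (pvSvals_pairwise vals).imp (fun h => ne_of_lt h)

theorem pv_pairwise_le {S : List Int} (h : S.Pairwise (· < ·)) {r s : Nat} (hrs : r ≤ s)
    (hs : s < S.length) : S[r]'(lt_of_le_of_lt hrs hs) ≤ S[s] := by
  rcases Nat.lt_or_ge r s with h' | h'
  · exact le_of_lt (List.pairwise_iff_getElem.mp h r s _ hs h')
  · have : r = s := le_antisymm hrs h'
    subst this; exact le_refl _

-- gap dictionaries: items and lookups
theorem pv_items_prevD (S : List Int) (hS : S.Nodup) :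
    (pvPrevD S).items = (S.zip S.tail).map (fun ab => (ab.2, ab.2 - ab.1)) := by
  unfold pvPrevD
  rw [PySem.Dict.items_foldl_insert_fresh (S.zip S.tail) (fun ab => ab.2) (fun ab => ab.2 - ab.1)
      PySem.Dict.empty (by intro a _; exact PySem.Dict.contains_empty _)
      (by rw [show (List.map (fun ab => ab.2) (S.zip S.tail)) = (S.zip S.tail).map Prod.snd from rfl,
              pv_zip_tail_snd]; exact hS.tail)]
  simp [PySem.Dict.empty]

theorem pv_items_nextD (S : List Int) (hS : S.Nodup) :
    (pvNextD S).items = (S.zip S.tail).map (fun ab => (ab.1, ab.2 - ab.1)) := by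
  unfold pvNextD
  rw [PySem.Dict.items_foldl_insert_fresh (S.zip S.tail) (fun ab => ab.1) (fun ab => ab.2 - ab.1)
      PySem.Dict.empty (by intro a _; exact PySem.Dict.contains_empty _)
      (by rw [show (List.map (fun ab => ab.1) (S.zip S.tail)) = (S.zip S.tail).map Prod.fst from rfl,
              pv_zip_tail_fst]; exact hS.sublist (List.dropLast_sublist S))]
  simp [PySem.Dict.empty]

theorem pv_keys_prevD (S : List Int) (hS : S.Nodup) : (pvPrevD S).keys = S.tail := by
  have h := pv_items_prevD S hS
  have h2 : (pvPrevD S).keys = (pvPrevD S).items.map Prod.fst := rfl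
  rw [h2, h, List.map_map]
  rw [show (Prod.fst ∘ fun (ab : Int × Int) => (ab.2, ab.2 - ab.1)) = Prod.snd from rfl, pv_zip_tail_snd]

theorem pv_keys_nextD (S : List Int) (hS : S.Nodup) : (pvNextD S).keys = S.dropLast := by
  have h := pv_items_nextD S hS
  have h2 : (pvNextD S).keys = (pvNextD S).items.map Prod.fst := rfl
  rw [h2, h, List.map_map]
  rw [show (Prod.fst ∘ fun (ab : Int × Int) => (ab.1, ab.2 - ab.1)) = Prod.fst from rfl, pv_zip_tail_fst]

theorem pv_get_prevD_none (S : List Int) (hS : S.Nodup) (v : Int) (h : v ∉ S.tail) :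
    (pvPrevD S).get? v = none := by
  rw [PySem.Dict.get?_eq_none_iff_not_mem_keys, pv_keys_prevD S hS]; exact h

theorem pv_get_nextD_none (S : List Int) (hS : S.Nodup) (v : Int) (h : v ∉ S.dropLast) :
    (pvNextD S).get? v = none := by
  rw [PySem.Dict.get?_eq_none_iff_not_mem_keys, pv_keys_nextD S hS]; exact h

theorem pv_get_prevD_some (S : List Int) (hS : S.Nodup) (q : Nat) (hq : q + 1 < S.length) :
    (pvPrevD S).get? (S[q + 1]) = some (S[q + 1] - S[q]'(by omega)) := by
  apply PySem.Dict.get?_of_mem_items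
  · rw [pv_items_prevD S hS]
    have hz : q < (S.zip S.tail).length := by simp [List.length_zip, List.length_tail]; omega
    have hzq : (S.zip S.tail)[q] = (S[q]'(by omega), S[q + 1]) := by
      rw [List.getElem_zip]
      congr 1
      exact List.getElem_tail _
    refine List.mem_map.mpr ⟨(S[q]'(by omega), S[q + 1]), ?_, rfl⟩
    rw [← hzq]; exact List.getElem_mem hz
  · rw [pv_keys_prevD S hS]; exact hS.tail

theorem pv_get_nextD_some (S : List Int) (hS : S.Nodup) (q : Nat) (hq : q + 1 < S.length) :
    (pvNextD S).get? (S[q]'(by omega)) = some (S[q + 1] - S[q]'(by omega)) := by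
  apply PySem.Dict.get?_of_mem_items
  · rw [pv_items_nextD S hS]
    have hz : q < (S.zip S.tail).length := by simp [List.length_zip, List.length_tail]; omega
    have hzq : (S.zip S.tail)[q] = (S[q]'(by omega), S[q + 1]) := by
      rw [List.getElem_zip]
      congr 1
      exact List.getElem_tail _
    refine List.mem_map.mpr ⟨(S[q]'(by omega), S[q + 1]), ?_, rfl⟩
    rw [← hzq]; exact List.getElem_mem hz
  · rw [pv_keys_nextD S hS]; exact hS.sublist (List.dropLast_sublist S)

-- the positive side: A's accumulated min over strictly smaller values vs B's predecessor gap
theorem pv_pos_eq (vals : List Int) (v : Int) (hv : v ∈ vals) :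
    pvThr (((vals.filter (fun w => decide (0 < v - w))).map (fun w => v - w)).foldl min 99999)
      = pvClamp ((pvPrevD (pvSvals vals)).get? v) := by
  have hpw := pvSvals_pairwise vals
  have hnd := pvSvals_nodup vals
  have hvS : v ∈ pvSvals vals := (pvSvals_mem vals v).mpr hv
  obtain ⟨q, hqlt, hq⟩ := List.getElem_of_mem hvS
  set S := pvSvals vals with hSdef
  have memS : ∀ w, w ∈ S ↔ w ∈ vals := fun w => pvSvals_mem vals w
  match q with
  | 0 =>
    have hmin : ∀ w ∈ vals, v ≤ w := by
      intro w hw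
      obtain ⟨r, hrlt, hr⟩ := List.getElem_of_mem ((memS w).mpr hw)
      rw [← hq, ← hr]
      exact pv_pairwise_le hpw (Nat.zero_le r) hrlt
    have hfil : vals.filter (fun w => decide (0 < v - w)) = [] := by
      rw [List.filter_eq_nil_iff]
      intro w hw
      have := hmin w hw
      simp; omega
    have hnt : v ∉ S.tail := by
      intro hmem
      obtain ⟨r, hrlt, hr⟩ := List.getElem_of_mem hmem
      rw [List.getElem_tail] at hr
      have : r + 1 = 0 := by
        apply (List.Nodup.getElem_inj_iff hnd).mp
        rw [hr, hq]
      omega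
    rw [hfil, pv_get_prevD_none S hnd v hnt]
    rfl
  | q' + 1 =>
    have hps : S[q']'(by omega) < v := by
      rw [← hq]
      exact List.pairwise_iff_getElem.mp hpw q' (q' + 1) (by omega) hqlt (by omega)
    have hpv : S[q']'(by omega) ∈ vals := (memS _).mp (List.getElem_mem _)
    set p := S[q']'(by omega) with hpdef
    have hg : v - p ∈ (vals.filter (fun w => decide (0 < v - w))).map (fun w => v - w) := by
      refine List.mem_map.mpr ⟨p, ?_, rfl⟩
      rw [List.mem_filter]
      exact ⟨hpv, by simp; omega⟩
    have hall : ∀ x ∈ (vals.filter (fun w => decide (0 < v - w))).map (fun w => v - w), v - p ≤ x := by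
      intro x hx
      obtain ⟨w, hwf, rfl⟩ := List.mem_map.mp hx
      rw [List.mem_filter] at hwf
      obtain ⟨hwv, hwlt⟩ := hwf
      have hwlt' : 0 < v - w := by simpa using hwlt
      obtain ⟨r, hrlt, hr⟩ := List.getElem_of_mem ((memS w).mpr hwv)
      have hrle : r ≤ q' := by
        by_contra hcon
        have h1 : q' + 1 ≤ r := by omega
        have h2 := pv_pairwise_le hpw h1 hrlt
        rw [hq, hr] at h2
        omega
      have hwp : w ≤ p := by rw [← hr]; exact pv_pairwise_le hpw hrle (by omega)
      omega
    rw [pv_mfold_eq_min _ _ hg hall, pvThr_min]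
    have : (pvPrevD S).get? v = some (v - p) := by
      rw [← hq]
      exact pv_get_prevD_some S hnd q' hqlt
    rw [this]

-- the negative side
theorem pv_neg_eq (vals : List Int) (k : Nat) (hk : k < vals.length) :
    pvThr ((((vals.take k ++ vals.drop (k + 1)).filter (fun w => decide (vals[k] - w ≤ 0))).map
        (fun w => -(vals[k] - w))).foldl min 99999)
      = (if ((vals.count vals[k] : Int)) > 1 then 0
         else pvClamp ((pvNextD (pvSvals vals)).get? vals[k])) := by
  set v := vals[k] with hvdef
  set E := vals.take k ++ vals.drop (k + 1) with hEdef
  have hdecomp : vals = vals.take k ++ v :: vals.drop (k + 1) := by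
    conv_lhs => rw [← List.take_append_drop k vals, List.drop_eq_getElem_cons hk]
  have hmemE : ∀ w ∈ E, w ∈ vals := by
    intro w hw
    rcases List.mem_append.mp hw with h | h
    · exact List.mem_of_mem_take h
    · exact List.mem_of_mem_drop h
  have hcount : vals.count v = (vals.take k).count v + (vals.drop (k + 1)).count v + 1 := by
    conv_lhs => rw [hdecomp]
    rw [List.count_append, List.count_cons]
    simp; omega
  by_cases hc : 1 < vals.count v
  · -- a duplicate exists: minimum nonnegative gap is 0
    rw [if_pos (by exact_mod_cast hc)]
    have hvE : v ∈ E := by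
      rcases Nat.pos_of_ne_zero (fun h0 => by omega : (vals.take k).count v + (vals.drop (k+1)).count v ≠ 0) with _
      have : 0 < (vals.take k).count v + (vals.drop (k + 1)).count v := by omega
      rcases Nat.lt_or_ge 0 ((vals.take k).count v) with h | h
      · exact List.mem_append.mpr (Or.inl (List.count_pos_iff.mp h))
      · have : 0 < (vals.drop (k + 1)).count v := by omega
        exact List.mem_append.mpr (Or.inr (List.count_pos_iff.mp this))
    have hg : (0 : Int) ∈ (E.filter (fun w => decide (v - w ≤ 0))).map (fun w => -(v - w)) := by
      refine List.mem_map.mpr ⟨v, ?_, by ring⟩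
      rw [List.mem_filter]
      exact ⟨hvE, by simp⟩
    have hall : ∀ x ∈ (E.filter (fun w => decide (v - w ≤ 0))).map (fun w => -(v - w)), (0:Int) ≤ x := by
      intro x hx
      obtain ⟨w, hwf, rfl⟩ := List.mem_map.mp hx
      rw [List.mem_filter] at hwf
      have := hwf.2
      simp at this
      omega
    rw [pv_mfold_eq_min _ _ hg hall]
    rfl
  · -- v occurs exactly once: the gap is to the strictly next larger distinct value
    rw [if_neg (by exact_mod_cast hc)]
    have hc1 : vals.count v = 1 := by
      have : 0 < vals.count v := List.count_pos_iff.mpr (by rw [hvdef]; exact List.getElem_mem hk)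
      omega
    have htake0 : v ∉ vals.take k := by
      intro h
      have := List.count_pos_iff.mpr h
      omega
    have hdrop0 : v ∉ vals.drop (k + 1) := by
      intro h
      have := List.count_pos_iff.mpr h
      omega
    have hneqE : ∀ w ∈ E, w ≠ v := by
      intro w hw heq
      subst heq
      rcases List.mem_append.mp hw with h | h
      · exact htake0 h
      · exact hdrop0 h
    have hpw := pvSvals_pairwise vals
    have hnd := pvSvals_nodup vals
    have hvS : v ∈ pvSvals vals := (pvSvals_mem vals v).mpr (by rw [hvdef]; exact List.getElem_mem hk)
    obtain ⟨q, hqlt, hq⟩ := List.getElem_of_mem hvS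
    set S := pvSvals vals with hSdef
    have memS : ∀ w, w ∈ S ↔ w ∈ vals := fun w => pvSvals_mem vals w
    by_cases hnext : q + 1 < S.length
    · -- a strictly larger value exists
      set g := S[q + 1] - v with hgdef
      have hlt : v < S[q + 1] := by
        rw [← hq]
        exact List.pairwise_iff_getElem.mp hpw q (q + 1) (by omega) hnext (by omega)
      have hSvE : S[q + 1] ∈ E := by
        have hmem : S[q + 1] ∈ vals := (memS _).mp (List.getElem_mem _)
        rw [hdecomp] at hmem
        rcases List.mem_append.mp hmem with h | h
        · exact List.mem_append.mpr (Or.inl h)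
        · rcases List.mem_cons.mp h with h | h
          · omega
          · exact List.mem_append.mpr (Or.inr h)
      have hg : g ∈ (E.filter (fun w => decide (v - w ≤ 0))).map (fun w => -(v - w)) := by
        refine List.mem_map.mpr ⟨S[q + 1], ?_, by rw [hgdef]; ring⟩
        rw [List.mem_filter]
        exact ⟨hSvE, by simp; omega⟩
      have hall : ∀ x ∈ (E.filter (fun w => decide (v - w ≤ 0))).map (fun w => -(v - w)), g ≤ x := by
        intro x hx
        obtain ⟨w, hwf, rfl⟩ := List.mem_map.mp hx
        rw [List.mem_filter] at hwf
        obtain ⟨hwE, hwle⟩ := hwf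
        have hwle' : v ≤ w := by simp at hwle; omega
        have hwv : v < w := lt_of_le_of_ne hwle' (Ne.symm (hneqE w hwE))
        obtain ⟨r, hrlt, hr⟩ := List.getElem_of_mem ((memS w).mpr (hmemE w hwE))
        have hrgt : q + 1 ≤ r := by
          by_contra hcon
          have h1 : r ≤ q := by omega
          have h2 := pv_pairwise_le hpw h1 hqlt
          rw [hq, hr] at h2
          omega
        have : S[q + 1] ≤ w := by rw [← hr]; exact pv_pairwise_le hpw hrgt hrlt
        omega
      rw [pv_mfold_eq_min _ _ hg hall, pvThr_min]
      have : (pvNextD S).get? v = some g := by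
        rw [← hq]
        have := pv_get_nextD_some S hnd q hnext
        rw [hq] at this ⊢
        rw [this, hgdef]
      rw [this]
    · -- v is the largest value
      have hmax : ∀ w ∈ vals, w ≤ v := by
        intro w hw
        obtain ⟨r, hrlt, hr⟩ := List.getElem_of_mem ((memS w).mpr hw)
        have : r ≤ q := by omega
        rw [← hq, ← hr]
        exact pv_pairwise_le hpw this hqlt
      have hfil : E.filter (fun w => decide (v - w ≤ 0)) = [] := by
        rw [List.filter_eq_nil_iff]
        intro w hw
        have h1 := hmax w (hmemE w hw)
        have h2 := hneqE w hw
        simp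
        omega
      have hnotd : v ∉ S.dropLast := by
        intro hmem
        obtain ⟨r, hrlt, hr⟩ := List.getElem_of_mem hmem
        rw [List.getElem_dropLast] at hr
        have hrq : r = q := by
          apply (List.Nodup.getElem_inj_iff hnd).mp
          rw [hr, hq]
        rw [List.length_dropLast] at hrlt
        omega
      rw [hfil, pv_get_nextD_none S hnd v hnotd]
      rfl

theorem pv_filter_lt_eraseIdx (vals : List Int) (k : Nat) (v : Int) (hk : k < vals.length)
    (hv : vals[k] = v) :
    (vals.take k ++ vals.drop (k + 1)).filter (fun w => decide (0 < v - w))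
      = vals.filter (fun w => decide (0 < v - w)) := by
  conv_rhs => rw [← List.take_append_drop k vals]
  rw [List.drop_eq_getElem_cons hk, hv]
  rw [List.filter_append, List.filter_append, List.filter_cons]
  simp

theorem pv_entry_eq (vals : List Int) (k : Nat) (hk : k < vals.length) :
    pvAEntry vals k = pvBEntry vals vals[k] := by
  unfold pvAEntry
  simp only [List.getD_eq_getElem vals 0 hk]
  rw [pv_filter_lt_eraseIdx vals k vals[k] hk rfl, pv_pos_eq vals vals[k] (List.getElem_mem hk),
      pv_neg_eq vals k hk]
  rfl

-- A's inner j-loop computes the two accumulated minima of pvAEntry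
theorem pv_range_fold_split (vals : List Int) (kk : Nat) (hk : kk < vals.length)
    (F : Int → Int → Int) (init : Int) :
    (PySem.List.pyRange 0 (vals.length : Int) 1).foldl
      (fun a j => if (kk : Int) ≠ j then F a (PySem.List.pyGetD vals j 0) else a) init
    = (vals.take kk ++ vals.drop (kk + 1)).foldl F init := by
  have h1 : ∀ s : Int, (PySem.List.pyRange 0 (kk : Int) 1).foldl
      (fun a j => if (kk : Int) ≠ j then F a (PySem.List.pyGetD vals j 0) else a) s
      = (vals.take kk).foldl F s := by
    intro s
    rw [PySem.List.foldl_congr_mem _ _ (fun a j => F a (PySem.List.pyGetD (vals.take kk) j 0)) s ?_]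
    · have hlen : (kk : Int) = ((vals.take kk).length : Int) := by
        simp [List.length_take]; omega
      rw [hlen, PySem.List.foldl_pyRange_zero_pyGetD' (vals.take kk) 0 F s]
    · intro acc j hj
      rw [PySem.List.mem_pyRange_one] at hj
      obtain ⟨h0, hlt⟩ := hj
      rw [if_pos (by omega)]
      congr 1
      obtain ⟨jn, rfl⟩ : ∃ jn : Nat, j = (jn : Int) := ⟨j.toNat, (Int.toNat_of_nonneg h0).symm⟩
      rw [PySem.List.pyGetD_natCast, PySem.List.pyGetD_natCast]
      have hjn : jn < kk := by exact_mod_cast hlt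
      rw [List.getD_eq_getElem _ _ (by omega), List.getD_eq_getElem _ _ (by simp [List.length_take]; omega)]
      simp [List.getElem_take]
  have h3 : ∀ s : Int, (PySem.List.pyRange ((kk : Int) + 1) (vals.length : Int) 1).foldl
      (fun a j => if (kk : Int) ≠ j then F a (PySem.List.pyGetD vals j 0) else a) s
      = (vals.drop (kk + 1)).foldl F s := by
    intro s
    rw [PySem.List.foldl_congr_mem _ _ (fun a j => F a (PySem.List.pyGetD vals j 0)) s ?_]
    · have := PySem.List.foldl_pyRange_pyGetD vals 0 F s (a := (kk : Int) + 1) (by positivity)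
      simp only [PySem.List.len] at this
      rw [this]
      have ht : (((kk : Int) + 1)).toNat = kk + 1 := by omega
      rw [ht]
    · intro acc j hj
      rw [PySem.List.mem_pyRange_one] at hj
      rw [if_pos (by omega)]
  rw [PySem.List.pyRange_one_append 0 (kk : Int) (vals.length : Int) (by positivity) (by exact_mod_cast hk.le)]
  rw [PySem.List.pyRange_one_cons (a := (kk : Int)) (by exact_mod_cast hk)]
  rw [List.foldl_append, List.foldl_cons, h1, if_neg (by simp), h3, ← List.foldl_append]

theorem pv_inner_eq (t : List (List Int)) (ii kk : Nat) (hk : kk < t.length) :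
    (PySem.List.pyRange 0 (t.length : Int) 1).foldl (fun (pn : Int × Int) j =>
        if (kk : Int) ≠ j then
          let d := PySem.List.pyGetD (PySem.List.pyGetD t (kk : Int) []) (ii : Int) 0
                   - PySem.List.pyGetD (PySem.List.pyGetD t j []) (ii : Int) 0
          if d > 0 then (min pn.1 d, pn.2) else (pn.1, min pn.2 (-d))
        else pn) ((99999 : Int), (99999 : Int))
      = ((((pvCol t ii).take kk ++ (pvCol t ii).drop (kk + 1)).filter
            (fun w => decide (0 < (pvCol t ii).getD kk 0 - w)) |>.map
            (fun w => (pvCol t ii).getD kk 0 - w)).foldl min 99999,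
         (((pvCol t ii).take kk ++ (pvCol t ii).drop (kk + 1)).filter
            (fun w => decide ((pvCol t ii).getD kk 0 - w ≤ 0)) |>.map
            (fun w => -((pvCol t ii).getD kk 0 - w))).foldl min 99999) := by
  set vals := pvCol t ii with hvals
  set v := vals.getD kk 0 with hv
  have hlen : vals.length = t.length := by simp [hvals, pvCol]
  have hA1 : PySem.List.pyGetD (PySem.List.pyGetD t (kk : Int) []) (ii : Int) 0 = v := by
    rw [PySem.List.pyGetD_natCast, PySem.List.pyGetD_natCast, hv, hvals]
    unfold pvCol
    conv_rhs => rw [List.getD_eq_getElem _ _ (by simpa using hk), List.getElem_map]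
    congr 1
    exact List.getD_eq_getElem _ _ hk
  have hbody : (PySem.List.pyRange 0 (t.length : Int) 1).foldl (fun (pn : Int × Int) j =>
        if (kk : Int) ≠ j then
          let d := PySem.List.pyGetD (PySem.List.pyGetD t (kk : Int) []) (ii : Int) 0
                   - PySem.List.pyGetD (PySem.List.pyGetD t j []) (ii : Int) 0
          if d > 0 then (min pn.1 d, pn.2) else (pn.1, min pn.2 (-d))
        else pn) ((99999 : Int), (99999 : Int))
      = (PySem.List.pyRange 0 (t.length : Int) 1).foldl (fun (pn : Int × Int) j =>
          ((fun a j' => if (kk : Int) ≠ j' then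
              (fun a w => if 0 < v - w then min a (v - w) else a) a (PySem.List.pyGetD vals j' 0) else a) pn.1 j,
           (fun b j' => if (kk : Int) ≠ j' then
              (fun b w => if v - w ≤ 0 then min b (-(v - w)) else b) b (PySem.List.pyGetD vals j' 0) else b) pn.2 j))
          ((99999 : Int), (99999 : Int)) := by
    apply PySem.List.foldl_congr_mem
    intro pn j hj
    rw [PySem.List.mem_pyRange_one] at hj
    obtain ⟨h0, hjlt⟩ := hj
    obtain ⟨jn, rfl⟩ : ∃ jn : Nat, j = (jn : Int) := ⟨j.toNat, (Int.toNat_of_nonneg h0).symm⟩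
    have hjn : jn < t.length := by exact_mod_cast hjlt
    have hA2 : PySem.List.pyGetD (PySem.List.pyGetD t (jn : Int) []) (ii : Int) 0
        = PySem.List.pyGetD vals (jn : Int) 0 := by
      rw [PySem.List.pyGetD_natCast, PySem.List.pyGetD_natCast, PySem.List.pyGetD_natCast, hvals]
      unfold pvCol
      conv_rhs => rw [List.getD_eq_getElem _ _ (by simpa using hjn), List.getElem_map]
      congr 1
      exact List.getD_eq_getElem _ _ hjn
    simp only [hA1, hA2]
    by_cases hkj : (kk : Int) ≠ (jn : Int)
    · rw [if_pos hkj, if_pos hkj, if_pos hkj]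
      by_cases hd : 0 < v - PySem.List.pyGetD vals (jn : Int) 0
      · rw [if_pos (by omega : v - PySem.List.pyGetD vals (jn : Int) 0 > 0), if_pos hd,
            if_neg (by omega)]
      · rw [if_neg (by omega : ¬ v - PySem.List.pyGetD vals (jn : Int) 0 > 0), if_neg hd,
            if_pos (by omega)]
    · rw [if_neg hkj, if_neg hkj, if_neg hkj]
  rw [hbody]
  rw [PySem.List.foldl_prod_mk
    (f := fun a j' => if (kk : Int) ≠ j' then
        (fun a w => if 0 < v - w then min a (v - w) else a) a (PySem.List.pyGetD vals j' 0) else a)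
    (g := fun b j' => if (kk : Int) ≠ j' then
        (fun b w => if v - w ≤ 0 then min b (-(v - w)) else b) b (PySem.List.pyGetD vals j' 0) else b)]
  have hk' : kk < vals.length := by omega
  rw [← hlen]
  rw [pv_range_fold_split vals kk hk' (fun a w => if 0 < v - w then min a (v - w) else a) 99999]
  rw [pv_range_fold_split vals kk hk' (fun b w => if v - w ≤ 0 then min b (-(v - w)) else b) 99999]
  rw [Prod.mk.injEq]
  constructor
  · rw [PySem.List.foldl_ite_eq_foldl_filter (fun w => 0 < v - w) (fun a w => min a (v - w))]
    rw [List.foldl_map (f := fun w => v - w) (g := min)]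
  · rw [PySem.List.foldl_ite_eq_foldl_filter (fun w => v - w ≤ 0) (fun b w => min b (-(v - w)))]
    rw [List.foldl_map (f := fun w => -(v - w)) (g := min)]

theorem pv_inner_set (kk : Nat) (f : Nat → Int) (L : Nat) (dm : List (List Int)) (h : L ≤ dm.length) :
    (List.range L).foldl (fun dm ii => dm.set ii ((dm.getD ii []).set kk (f ii))) dm
    = dm.mapIdx (fun ii row => if ii < L then row.set kk (f ii) else row) := by
  induction L with
  | zero =>
    simp
    apply List.ext_getElem (by simp)
    intro i h1 h2
    simp
  | succ L ih =>
    rw [List.range_succ, List.foldl_append, ih (by omega), List.foldl_cons, List.foldl_nil]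
    apply List.ext_getElem (by simp)
    intro i h1 h2
    rw [List.getElem_set]
    by_cases hiL : i = L
    · subst hiL
      rw [if_pos rfl, List.getElem_mapIdx, List.getD_eq_getElem _ _ (by simp; omega),
          List.getElem_mapIdx, if_neg (by omega), if_pos (by omega)]
    · rw [if_neg (show ¬ L = i from fun hh => hiL hh.symm), List.getElem_mapIdx, List.getElem_mapIdx]
      by_cases hlt : i < L
      · rw [if_pos hlt, if_pos (by omega)]
      · rw [if_neg hlt, if_neg (by omega)]

theorem pv_mapIdx_map_range {α β : Type} (M : Nat) (f : Nat → α) (g : Nat → α → β) :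
    ((List.range M).map f).mapIdx g = (List.range M).map (fun ii => g ii (f ii)) := by
  apply List.ext_getElem (by simp)
  intro i h1 h2
  simp

theorem pv_matrix_fold (e : Nat → Nat → Int) (N M : Nat) :
    (List.range N).foldl (fun dm kk =>
        (List.range M).foldl (fun dm ii => dm.set ii ((dm.getD ii []).set kk (e ii kk))) dm)
      ((List.range M).map (fun _ => List.replicate N 0))
    = (List.range M).map (fun ii => (List.range N).map (fun kk => e ii kk)) := by
  suffices h : ∀ K, K ≤ N → (List.range K).foldl (fun dm kk =>
        (List.range M).foldl (fun dm ii => dm.set ii ((dm.getD ii []).set kk (e ii kk))) dm)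
      ((List.range M).map (fun _ => List.replicate N 0))
      = (List.range M).map (fun ii => (List.range K).map (fun kk => e ii kk) ++ List.replicate (N - K) 0) by
    have := h N (le_refl N)
    simpa using this
  intro K hK
  induction K with
  | zero => simp
  | succ K ih =>
    rw [List.range_succ, List.foldl_append, ih (by omega), List.foldl_cons, List.foldl_nil]
    rw [pv_inner_set K _ M _ (by simp)]
    rw [pv_mapIdx_map_range]
    apply List.map_congr_left
    intro ii hii
    rw [List.mem_range] at hii
    rw [if_pos hii]
    have hrep : List.replicate (N - K) (0 : Int) = 0 :: List.replicate (N - (K + 1)) 0 := by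
      have : N - K = (N - (K + 1)) + 1 := by omega
      rw [this, List.replicate_succ]
    rw [hrep, List.set_append_right _ _ (by simp)]
    simp only [List.length_map, List.length_range, Nat.sub_self, List.set_cons_zero]
    simp [List.map_append]

theorem pv_A_shape (t : List (List Int)) :
    get_min_distances_map t
      = (List.range (t.headD []).length).map (fun ii =>
          (List.range t.length).map (fun kk => pvAEntry (pvCol t ii) kk)) := by
  unfold get_min_distances_map
  have hstep : (PySem.List.pyRange 0 ((t.length : Int)) 1).foldl (fun dm k =>
      (PySem.List.pyRange 0 (((t.headD []).length : Int)) 1).foldl (fun dm i =>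
        let pn := (PySem.List.pyRange 0 ((t.length : Int)) 1).foldl (fun (pn : Int × Int) j =>
          if k ≠ j then
            let d := PySem.List.pyGetD (PySem.List.pyGetD t k []) i 0
                     - PySem.List.pyGetD (PySem.List.pyGetD t j []) i 0
            if d > 0 then (min pn.1 d, pn.2) else (pn.1, min pn.2 (-d))
          else pn) ((99999 : Int), (99999 : Int))
        let d_pos := if pn.1 > 49999 then (-1 : Int) else pn.1
        let d_neg := if pn.2 > 49999 then (-1 : Int) else pn.2
        dm.set i.toNat ((dm.getD i.toNat []).set k.toNat (max d_pos d_neg))) dm)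
      ((PySem.List.pyRange 0 (((t.headD []).length : Int)) 1).map (fun _ => List.replicate ((t.length : Int)).toNat 0))
    = (PySem.List.pyRange 0 ((t.length : Int)) 1).foldl (fun dm k =>
      (PySem.List.pyRange 0 (((t.headD []).length : Int)) 1).foldl (fun dm i =>
        dm.set i.toNat ((dm.getD i.toNat []).set k.toNat (pvAEntry (pvCol t i.toNat) k.toNat))) dm)
      ((PySem.List.pyRange 0 (((t.headD []).length : Int)) 1).map (fun _ => List.replicate ((t.length : Int)).toNat 0)) := by
    apply PySem.List.foldl_congr_mem
    intro dm k hkmem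
    rw [PySem.List.mem_pyRange_one] at hkmem
    obtain ⟨hk0, hklt⟩ := hkmem
    obtain ⟨kk, rfl⟩ : ∃ kk : Nat, k = (kk : Int) := ⟨k.toNat, (Int.toNat_of_nonneg hk0).symm⟩
    have hkk : kk < t.length := by exact_mod_cast hklt
    apply PySem.List.foldl_congr_mem
    intro dm' i himem
    rw [PySem.List.mem_pyRange_one] at himem
    obtain ⟨hi0, _⟩ := himem
    obtain ⟨ii, rfl⟩ : ∃ ii : Nat, i = (ii : Int) := ⟨i.toNat, (Int.toNat_of_nonneg hi0).symm⟩
    rw [pv_inner_eq t ii kk hkk]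
    rfl
  rw [hstep]
  simp only [PySem.List.pyRange_zero_nat, List.foldl_map, List.map_map, Int.toNat_natCast]
  exact pv_matrix_fold (fun ii kk => pvAEntry (pvCol t ii) kk) t.length (t.headD []).length

def pvRowB (t : List (List Int)) (i : Int) : List Int :=
  let vals := t.map (fun row => PySem.List.pyGetD row i 0)
  let cnt := vals.foldl (fun (d : PySem.Dict Int Int) v => d.insert v (d.getD v 0 + 1)) PySem.Dict.empty
  let svals := PySem.List.sorted cnt.keys (fun x => x) false
  let gaps := (svals.zip svals.tail).foldl
    (fun (gp : PySem.Dict Int Int × PySem.Dict Int Int) ab =>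
      (gp.1.insert ab.2 (ab.2 - ab.1), gp.2.insert ab.1 (ab.2 - ab.1))) (PySem.Dict.empty, PySem.Dict.empty)
  vals.foldl (fun ro v =>
    let dpos := pvClamp (gaps.1.get? v)
    let dneg := if cnt.getD v 0 > 1 then (0 : Int) else pvClamp (gaps.2.get? v)
    ro ++ [max dpos dneg]) []

theorem pv_rowB_eq (t : List (List Int)) (ii : Nat) :
    pvRowB t (ii : Int) = (pvCol t ii).map (pvBEntry (pvCol t ii)) := by
  have hvals : t.map (fun row => PySem.List.pyGetD row (ii : Int) 0) = pvCol t ii := by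
    unfold pvCol
    apply List.map_congr_left
    intro row _
    exact PySem.List.pyGetD_natCast row ii 0
  unfold pvRowB
  simp only [hvals, PySem.Dict.foldl_insert_getD_add_one_eq_counter, PySem.Dict.keys_counter,
    PySem.Dict.getD_counter, PySem.List.foldl_append_singleton_eq_map,
    List.nil_append]
  rw [PySem.List.foldl_prod_mk (f := fun (d : PySem.Dict Int Int) (ab : Int × Int) => d.insert ab.2 (ab.2 - ab.1))
      (g := fun (d : PySem.Dict Int Int) (ab : Int × Int) => d.insert ab.1 (ab.2 - ab.1))]
  apply List.map_congr_left
  intro v _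
  rfl
theorem pv_B_shape (t : List (List Int)) :
    get_min_distances_map_alt t
      = (List.range (t.headD []).length).map (fun ii =>
          (pvCol t ii).map (fun v => pvBEntry (pvCol t ii) v)) := by
  have h0 : get_min_distances_map_alt t
      = (PySem.List.pyRange 0 ((t.headD []).length : Int) 1).foldl
          (fun out i => out ++ [pvRowB t i]) [] := rfl
  rw [h0, PySem.List.foldl_append_singleton_eq_map, List.nil_append,
      PySem.List.pyRange_zero_nat, List.map_map]
  apply List.map_congr_left
  intro ii _
  exact pv_rowB_eq t ii

-- ===== VERDICT (by name: the statement is the Claim_ definition above) =====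
theorem get_min_distances_map_spec : Claim_equal_get_min_distances_map := by
  intro t _ _
  unfold Spec_get_min_distances_map
  rw [pv_A_shape, pv_B_shape]
  apply List.map_congr_left
  intro ii _
  apply List.ext_getElem
  · simp [pvCol]
  · intro kk h1 h2
    have hk : kk < (pvCol t ii).length := by simpa [pvCol] using h2
    simp only [List.getElem_map, List.getElem_range]
    exact pv_entry_eq (pvCol t ii) kk hk
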